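-- pv_equiv track=rewrite | github.com/tbj128/philips-ecg-parser | philips.py | decode_deltas
-- ===== SOURCE A (Python) =====
-- def decode_deltas(input, initial_value):
--     deltas = input.copy()
--     x = deltas[0]
--     y = deltas[1]
--     last_value = initial_value
--     i = 2
--     while i < len(deltas):
--         z = (y + y) - x - last_value
--         last_value = deltas[i] - 64
--         deltas[i] = z
--         x = y
--         y = z
--         i += 1
--     return deltas
-- ===== SOURCE B (Python) =====
-- def decode_deltas(input, initial_value):
--     # Closed form: the second difference of the output equals minus the i-th
--     # increment, so out[i] = a + i*(b-a) - sum_{j<=i} (i-j+1)*inc_j, which is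
--     # computed per index from two weighted partial sums S = sum(inc_j) and
--     # T = sum(j*inc_j) as out[i] = a + i*(b-a) - (i+1)*S + T.
--     a = input[0]
--     b = input[1]
--     d = b - a
--     out = [a, b]
--     S = 0
--     T = 0
--     for i in range(2, len(input)):
--         inc = initial_value if i == 2 else input[i - 1] - 64
--         S += inc
--         T += i * inc
--         out.append(a + i * d - (i + 1) * S + T)
--     return out
-- ===== Notes on version B (the rewrite author's own statement) =====
-- stated objective: alternative
-- what changed: Replaces A's second-order recurrence z = 2y - x - last (each value from the two previous outputs) with a per-index closed form out[i] = a + i*(b-a) - (i+1)*S + T computed from two weighted partial sums S = sum(inc_j) and T = sum(j*inc_j) of the increments, never referring to previous outputs.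
import Mathlib
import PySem

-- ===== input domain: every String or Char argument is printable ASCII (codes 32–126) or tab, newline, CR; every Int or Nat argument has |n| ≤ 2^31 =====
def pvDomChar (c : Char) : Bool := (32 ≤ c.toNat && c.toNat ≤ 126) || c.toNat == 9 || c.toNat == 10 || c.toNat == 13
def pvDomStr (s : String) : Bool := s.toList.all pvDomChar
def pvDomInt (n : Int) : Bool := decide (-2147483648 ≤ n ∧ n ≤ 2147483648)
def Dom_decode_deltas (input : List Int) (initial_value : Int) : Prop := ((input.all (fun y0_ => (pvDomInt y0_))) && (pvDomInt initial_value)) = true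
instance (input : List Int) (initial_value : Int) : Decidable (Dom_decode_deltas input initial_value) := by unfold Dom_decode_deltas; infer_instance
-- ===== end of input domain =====

-- B replaces A's second-order recurrence over a mutated copy with a per-index
-- closed form out[i] = a + i*(b-a) - (i+1)*S_i + T_i from two weighted partial
-- sums of the increments (objective: alternative).


-- ===== PORT A =====
-- while loop: state (deltas, x, y, last_value, i); deltas[i] read via pyGet?
-- (in range whenever the loop guard holds, so the .getD 0 default is never used).
def decodeLoopA (deltas : List Int) (x y last_value : Int) (i : Nat) : List Int :=
  if h : i < deltas.length then
    let z := (y + y) - x - last_value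
    let lv := ((PySem.List.pyGet? deltas (i : Int)).getD 0) - 64
    decodeLoopA (deltas.set i z) y z lv (i + 1)
  else deltas
termination_by deltas.length - i
decreasing_by simpa using by omega

-- deltas[0] / deltas[1] raise IndexError for length < 2: those inputs are
-- excluded by Pre_decode_deltas; the .getD 0 default is never reached inside it.
def decode_deltas (input : List Int) (initial_value : Int) : List Int :=
  let deltas := input
  let x := (PySem.List.pyGet? deltas 0).getD 0
  let y := (PySem.List.pyGet? deltas 1).getD 0
  decodeLoopA deltas x y initial_value 2

-- ===== PORT B =====
-- fold state: (out, S, T); one range iteration of Source B's loop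
def altStep (input : List Int) (iv a d : Int) (st : List Int × Int × Int) (i : Int) :
    List Int × Int × Int :=
  let inc := if i == 2 then iv else ((PySem.List.pyGet? input (i - 1)).getD 0) - 64
  let S := st.2.1 + inc
  let T := st.2.2 + i * inc
  (st.1 ++ [a + i * d - (i + 1) * S + T], S, T)

def decode_deltas_alt (input : List Int) (initial_value : Int) : List Int :=
  let a := (PySem.List.pyGet? input 0).getD 0
  let b := (PySem.List.pyGet? input 1).getD 0
  let d := b - a
  ((PySem.List.pyRange 2 (input.length : Int) 1).foldl
      (altStep input initial_value a d) ([a, b], 0, 0)).1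

-- ===== PRECONDITION & SPEC =====
-- Python A raises IndexError (input[0] or input[1]) when the list has fewer
-- than two elements; B raises there too.
def Pre_decode_deltas (input : List Int) (_initial_value : Int) : Prop := 2 ≤ input.length
instance (input : List Int) (initial_value : Int) : Decidable (Pre_decode_deltas input initial_value) := by unfold Pre_decode_deltas; infer_instance
def pvWitness_decode_deltas : List Int × Int := ([3, 1, 70, 66, 60], 2)
def Spec_decode_deltas (input : List Int) (initial_value : Int) (out : List Int) : Prop := out = decode_deltas_alt input initial_value
instance (input : List Int) (initial_value : Int) (out : List Int) : Decidable (Spec_decode_deltas input initial_value out) := by unfold Spec_decode_deltas; infer_instance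

-- ===== CLAIM (what is proved, stated in full; the proofs are below) =====
def Claim_equal_decode_deltas : Prop := ∀ (input : List Int) (initial_value : Int), Dom_decode_deltas input initial_value → Pre_decode_deltas input initial_value → Spec_decode_deltas input initial_value (decode_deltas input initial_value)

-- ===== LEMMAS AND PROOFS =====

-- A's loop, rephrased as structural recursion on the untouched suffix.
def coreA : List Int → Int → Int → Int → List Int
  | [], _, _, _ => []
  | d :: rs, x, y, lv => ((y + y) - x - lv) :: coreA rs y ((y + y) - x - lv) (d - 64)

-- closed-form recursion mirroring B's per-index formula (i, S, T as state)
def coreF (a b : Int) : List Int → Int → Int → Int → Int → List Int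
  | [], _, _, _, _ => []
  | d0 :: rs, lv, i, S, T =>
      (a + i * (b - a) - (i + 1) * (S + lv) + (T + i * lv)) ::
        coreF a b rs (d0 - 64) (i + 1) (S + lv) (T + i * lv)

theorem decodeLoopA_eq (n : Nat) : ∀ (deltas : List Int) (x y lv : Int) (i : Nat),
    deltas.length - i = n →
    decodeLoopA deltas x y lv i = deltas.take i ++ coreA (deltas.drop i) x y lv := by
  induction n with
  | zero =>
    intro deltas x y lv i hn
    rw [decodeLoopA]
    have hge : deltas.length ≤ i := by omega
    simp [hge, List.drop_eq_nil_of_le hge, List.take_of_length_le hge, coreA]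
  | succ m ih =>
    intro deltas x y lv i hn
    have hlt : i < deltas.length := by omega
    rw [decodeLoopA]
    simp only [hlt, dif_pos]
    have hget : (PySem.List.pyGet? deltas (i : Int)).getD 0 = deltas[i] := by
      simp [hlt]
    have hdrop : deltas.drop i = deltas[i] :: deltas.drop (i + 1) :=
      List.drop_eq_getElem_cons hlt
    rw [hget, ih (deltas.set i ((y + y) - x - lv)) _ _ _ (i + 1) (by simp; omega)]
    rw [hdrop]
    simp only [coreA]
    have htake : (deltas.set i ((y + y) - x - lv)).take (i + 1)
        = deltas.take i ++ [(y + y) - x - lv] := by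
      rw [List.take_add_one, List.take_set_of_le (le_refl i)]
      simp [hlt]
    have hdrop' : (deltas.set i ((y + y) - x - lv)).drop (i + 1) = deltas.drop (i + 1) :=
      List.drop_set_of_lt (by omega)
    rw [htake, hdrop']
    simp

-- A's recurrence produces exactly the closed-form values.
theorem coreA_eq_coreF (a b : Int) : ∀ (rest : List Int) (x y lv i S T : Int),
    x = a + (i - 2) * (b - a) - ((i - 1) * S - T) →
    y = a + (i - 1) * (b - a) - (i * S - T) →
    coreA rest x y lv = coreF a b rest lv i S T := by
  intro rest
  induction rest with
  | nil => intro x y lv i S T _ _; simp [coreA, coreF]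
  | cons d0 rs ih =>
    intro x y lv i S T hx hy
    simp only [coreA, coreF]
    have hz : (y + y) - x - lv
        = a + i * (b - a) - (i + 1) * (S + lv) + (T + i * lv) := by
      subst hx hy; ring
    rw [hz]
    congr 1
    apply ih
    · rw [hy]; ring
    · ring

theorem getElem_cons_cons_of_ge {a b : Int} (l : List Int) (i : Nat) (h2 : 2 ≤ i)
    (h : i < (a :: b :: l).length) :
    (a :: b :: l)[i] = l[i - 2]'(by simp at h; omega) := by
  rcases i with _ | _ | j
  · omega
  · omega
  · simp

-- B's fold over the tail of the range (i ≥ 3), as structural recursion.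
theorem foldl_altStep_eq (a b iv : Int) (rest : List Int) :
    ∀ (rs : List Int) (i : Nat) (S T : Int) (out : List Int),
      3 ≤ i → i ≤ rest.length + 2 → rs = rest.drop (i - 2) →
      ((PySem.List.pyRange (i : Int) (((a :: b :: rest).length : Nat) : Int) 1).foldl
          (altStep (a :: b :: rest) iv a (b - a)) (out, S, T)).1
        = out ++ coreF a b rs
            (((PySem.List.pyGet? (a :: b :: rest) ((i : Int) - 1)).getD 0) - 64) i S T := by
  intro rs
  induction rs with
  | nil =>
    intro i S T out h3 hle hdrop
    have hlen : rest.length ≤ i - 2 := by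
      by_contra h
      have : rest.drop (i - 2) ≠ [] := by
        simp [List.drop_eq_nil_iff]; omega
      exact this hdrop.symm
    have hi : i = rest.length + 2 := by omega
    have hnil : PySem.List.pyRange (i : Int) (((a :: b :: rest).length : Nat) : Int) 1 = [] := by
      apply PySem.List.pyRange_one_eq_nil
      simp; omega
    rw [hnil]
    simp [coreF]
  | cons d0 t ih =>
    intro i S T out h3 hle hdrop
    have hlt : i - 2 < rest.length := by
      by_contra h
      have : rest.drop (i - 2) = [] := List.drop_eq_nil_of_le (by omega)
      rw [this] at hdrop; exact (List.cons_ne_nil d0 t) hdrop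
    have hcons : PySem.List.pyRange (i : Int) (((a :: b :: rest).length : Nat) : Int) 1
        = (i : Int) :: PySem.List.pyRange ((i : Int) + 1) (((a :: b :: rest).length : Nat) : Int) 1 := by
      apply PySem.List.pyRange_one_cons
      simp; omega
    rw [hcons, List.foldl_cons]
    have hne : ((i : Int) == 2) = false := by
      simp; omega
    have hd0 : rest[i - 2] = d0 := by
      have : (rest.drop (i - 2))[0]'(by rw [← hdrop]; simp) = d0 := by
        simp [← hdrop]
      simpa [List.getElem_drop] using this
    have hstep : altStep (a :: b :: rest) iv a (b - a) (out, S, T) (i : Int)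
        = (out ++ [a + (i : Int) * (b - a) - ((i : Int) + 1) *
              (S + (((PySem.List.pyGet? (a :: b :: rest) ((i : Int) - 1)).getD 0) - 64)) +
              (T + (i : Int) * (((PySem.List.pyGet? (a :: b :: rest) ((i : Int) - 1)).getD 0) - 64))],
           S + (((PySem.List.pyGet? (a :: b :: rest) ((i : Int) - 1)).getD 0) - 64),
           T + (i : Int) * (((PySem.List.pyGet? (a :: b :: rest) ((i : Int) - 1)).getD 0) - 64)) := by
      simp only [altStep, hne]
      simp
    rw [hstep]
    have hih := ih (i + 1)
      (S + (((PySem.List.pyGet? (a :: b :: rest) ((i : Int) - 1)).getD 0) - 64))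
      (T + (i : Int) * (((PySem.List.pyGet? (a :: b :: rest) ((i : Int) - 1)).getD 0) - 64))
      (out ++ [a + (i : Int) * (b - a) - ((i : Int) + 1) *
              (S + (((PySem.List.pyGet? (a :: b :: rest) ((i : Int) - 1)).getD 0) - 64)) +
              (T + (i : Int) * (((PySem.List.pyGet? (a :: b :: rest) ((i : Int) - 1)).getD 0) - 64))])
      (by omega) (by omega)
      (by
        have h' : rest.drop (i + 1 - 2) = (rest.drop (i - 2)).drop 1 := by
          rw [List.drop_drop]; congr 1; omega
        rw [h', ← hdrop]
        rfl)
    have hcast : (((i + 1 : Nat) : Int)) = (i : Int) + 1 := by push_cast; ring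
    rw [hcast] at hih
    rw [hih]
    have hget : (PySem.List.pyGet? (a :: b :: rest) ((i : Int) + 1 - 1)).getD 0 = d0 := by
      have : ((i : Int) + 1 - 1) = ((i : Nat) : Int) := by ring
      rw [this, PySem.List.pyGet?_natCast]
      have hilen : i < (a :: b :: rest).length := by simp; omega
      rw [List.getElem?_eq_getElem hilen]
      have : (a :: b :: rest)[i] = rest[i - 2]'(by omega) :=
        getElem_cons_cons_of_ge rest i (by omega) hilen
      simp [this, hd0]
    rw [hget]
    simp only [coreF]
    simp

-- ===== VERDICT (by name: the statement is the Claim_ definition above) =====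
theorem decode_deltas_spec : Claim_equal_decode_deltas := by
  intro input initial_value _ hpre
  unfold Pre_decode_deltas at hpre
  match input, hpre with
  | a :: b :: rest, _ =>
    unfold Spec_decode_deltas decode_deltas decode_deltas_alt
    have h0 : (PySem.List.pyGet? (a :: b :: rest) 0).getD 0 = a := by
      rw [show (0 : Int) = ((0 : Nat) : Int) from rfl, PySem.List.pyGet?_natCast]; rfl
    have h1 : (PySem.List.pyGet? (a :: b :: rest) 1).getD 0 = b := by
      rw [show (1 : Int) = ((1 : Nat) : Int) from rfl, PySem.List.pyGet?_natCast]; rfl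
    simp only [h0, h1]
    have hA := decodeLoopA_eq ((a :: b :: rest).length - 2) (a :: b :: rest)
        a b initial_value 2 rfl
    rw [hA]
    have hAC : coreA rest a b initial_value = coreF a b rest initial_value 2 0 0 :=
      coreA_eq_coreF a b rest a b initial_value 2 0 0 (by ring) (by ring)
    cases rest with
    | nil =>
      have : PySem.List.pyRange 2 (((a :: b :: ([] : List Int)).length : Nat) : Int) 1 = [] := by
        apply PySem.List.pyRange_one_eq_nil; simp
      rw [this]
      simp [coreA]
    | cons r0 t =>
      have hcons : PySem.List.pyRange 2 (((a :: b :: r0 :: t).length : Nat) : Int) 1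
          = (2 : Int) :: PySem.List.pyRange 3 (((a :: b :: r0 :: t).length : Nat) : Int) 1 := by
        have := PySem.List.pyRange_one_cons (a := (2 : Int))
          (b := (((a :: b :: r0 :: t).length : Nat) : Int)) (by simp; omega)
        simpa using this
      rw [hcons, List.foldl_cons]
      have hstep2 : altStep (a :: b :: r0 :: t) initial_value a (b - a) ([a, b], 0, 0) 2
          = ([a, b, a + 2 * (b - a) - 3 * initial_value + 2 * initial_value],
             initial_value, 2 * initial_value) := by
        simp [altStep]
      rw [hstep2]
      have hBL := foldl_altStep_eq a b initial_value (r0 :: t) t 3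
        initial_value (2 * initial_value)
        [a, b, a + 2 * (b - a) - 3 * initial_value + 2 * initial_value]
        (by omega) (by simp) (by simp)
      rw [show ((3 : Nat) : Int) = (3 : Int) from rfl] at hBL
      rw [hBL]
      have hget2 : (PySem.List.pyGet? (a :: b :: r0 :: t) ((3 : Int) - 1)).getD 0 = r0 := by
        rw [show ((3 : Int) - 1) = ((2 : Nat) : Int) by ring, PySem.List.pyGet?_natCast]; rfl
      rw [hget2]
      rw [show List.take 2 (a :: b :: r0 :: t) = [a, b] from rfl,
        show List.drop 2 (a :: b :: r0 :: t) = r0 :: t from rfl]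
      rw [hAC]
      simp only [coreF]
      simp
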